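-- pv_equiv track=rewrite | github.com/cazares/mixterioso | scripts/gen_master.py | parse_steps_string
-- ===== SOURCE A (Python) =====
-- def parse_steps_string(s: str) -> list[int]:
--     steps: list[int] = []
--     for ch in s:
--         if ch in "01234":
--             v = int(ch)
--             if v not in steps:
--                 steps.append(v)
--     steps.sort()
--     return steps
-- ===== SOURCE B (Python) =====
-- def parse_steps_string(s: str) -> list[int]:
--     return [d for d in range(5) if str(d) in s]
-- ===== Notes on version B (the rewrite author's own statement) =====
-- stated objective: simpler
-- what changed: Instead of scanning the string, deduplicating against a growing result list and sorting at the end, B iterates over the five candidate digits in increasing order and keeps those whose character occurs in the string, which is sorted and duplicate-free by construction.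
import Mathlib
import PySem

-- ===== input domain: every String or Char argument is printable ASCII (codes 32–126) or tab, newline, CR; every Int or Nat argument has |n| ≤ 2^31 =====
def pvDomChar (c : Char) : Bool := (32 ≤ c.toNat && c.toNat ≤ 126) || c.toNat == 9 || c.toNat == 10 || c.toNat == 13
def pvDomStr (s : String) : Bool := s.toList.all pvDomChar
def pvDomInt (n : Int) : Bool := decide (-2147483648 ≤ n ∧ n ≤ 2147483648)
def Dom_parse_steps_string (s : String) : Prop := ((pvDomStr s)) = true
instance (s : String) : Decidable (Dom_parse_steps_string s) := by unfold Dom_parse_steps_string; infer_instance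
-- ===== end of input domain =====

-- B iterates over the fixed digits 0..4 and keeps those present in the string (sorted,
-- duplicate-free by construction) instead of scanning, deduplicating and sorting; objective: simpler.


-- ===== PORT A =====
-- one loop iteration: `if ch in "01234": v = int(ch); if v not in steps: steps.append(v)`
-- ('ch in "01234"' with a single char ch is exactly list membership; int(ch) for a digit
-- char is its code minus 48 — exact on the digit branch where it is evaluated)
def pvStepA (steps : List Int) (ch : Char) : List Int :=
  if ch ∈ ['0', '1', '2', '3', '4'] then
    let v : Int := (ch.toNat : Int) - 48
    if v ∈ steps then steps else steps ++ [v]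
  else steps

def parse_steps_string (s : String) : List Int :=
  PySem.List.sorted (s.toList.foldl pvStepA []) (fun x => x) false

-- ===== PORT B =====
-- [d for d in range(5) if str(d) in s]; str(d) for 0 ≤ d ≤ 4 is the single digit char
-- (code 48+d), and a one-char substring test is character membership — exact here.
def parse_steps_string_alt (s : String) : List Int :=
  (PySem.List.pyRange 0 5 1).filter (fun d => decide (Char.ofNat (48 + d.toNat) ∈ s.toList))

-- ===== PRECONDITION & SPEC =====
def Spec_parse_steps_string (s : String) (out : List Int) : Prop := out = parse_steps_string_alt s
instance (s : String) (out : List Int) : Decidable (Spec_parse_steps_string s out) := by unfold Spec_parse_steps_string; infer_instance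

-- ===== CLAIM (what is proved, stated in full; the proofs are below) =====
def Claim_equal_parse_steps_string : Prop := ∀ (s : String), Dom_parse_steps_string s → Spec_parse_steps_string s (parse_steps_string s)

-- ===== LEMMAS AND PROOFS =====

theorem pvMem_fold (l : List Char) (acc : List Int) (v : Int) :
    v ∈ l.foldl pvStepA acc ↔
      v ∈ acc ∨ ∃ ch ∈ l, ch ∈ ['0', '1', '2', '3', '4'] ∧ v = (ch.toNat : Int) - 48 := by
  induction l generalizing acc with
  | nil => simp
  | cons c t ih =>
    simp only [List.foldl_cons, ih, List.mem_cons, pvStepA]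
    split_ifs with hc hv
    · constructor
      · rintro (h | ⟨ch, hch, hd, rfl⟩)
        · exact Or.inl h
        · exact Or.inr ⟨ch, Or.inr hch, hd, rfl⟩
      · rintro (h | ⟨ch, (rfl | hch), hd, rfl⟩)
        · exact Or.inl h
        · exact Or.inl hv
        · exact Or.inr ⟨ch, hch, hd, rfl⟩
    · constructor
      · rintro (h | ⟨ch, hch, hd, rfl⟩)
        · rcases List.mem_append.mp h with h | h
          · exact Or.inl h
          · simp at h; exact Or.inr ⟨c, Or.inl rfl, hc, h⟩
        · exact Or.inr ⟨ch, Or.inr hch, hd, rfl⟩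
      · rintro (h | ⟨ch, (rfl | hch), hd, rfl⟩)
        · exact Or.inl (List.mem_append.mpr (Or.inl h))
        · exact Or.inl (by simp)
        · exact Or.inr ⟨ch, hch, hd, rfl⟩
    · constructor
      · rintro (h | ⟨ch, hch, hd, rfl⟩)
        · exact Or.inl h
        · exact Or.inr ⟨ch, Or.inr hch, hd, rfl⟩
      · rintro (h | ⟨ch, (rfl | hch), hd, rfl⟩)
        · exact Or.inl h
        · exact absurd hd hc
        · exact Or.inr ⟨ch, hch, hd, rfl⟩

theorem pvNodup_fold (l : List Char) (acc : List Int) (h : acc.Nodup) :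
    (l.foldl pvStepA acc).Nodup := by
  induction l generalizing acc with
  | nil => exact h
  | cons c t ih =>
    simp only [List.foldl_cons, pvStepA]
    split_ifs with hc hv
    · exact ih _ h
    · refine ih _ ?_
      simp only [List.nodup_append, h, List.nodup_cons, List.not_mem_nil, not_false_iff,
        List.nodup_nil, and_true, true_and]
      intro a ha b hb h
      simp only [List.mem_singleton] at hb
      exact hv (hb ▸ h ▸ ha)
    · exact ih _ h

-- B's list is a strictly increasing rearrangement of A's collected digits
theorem pvPerm (s : String) :
    (parse_steps_string_alt s).Perm (s.toList.foldl pvStepA []) := by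
  unfold parse_steps_string_alt
  rw [List.perm_ext_iff_of_nodup
      (List.Nodup.filter _ (by decide)) (pvNodup_fold _ _ List.nodup_nil)]
  intro v
  rw [pvMem_fold]
  simp only [List.mem_filter, decide_eq_true_eq, List.not_mem_nil, false_or]
  constructor
  · rintro ⟨hr, hmem⟩
    have hv : v = 0 ∨ v = 1 ∨ v = 2 ∨ v = 3 ∨ v = 4 := by
      have := (PySem.List.mem_pyRange_one).mp hr; omega
    rcases hv with rfl | rfl | rfl | rfl | rfl <;>
      exact ⟨_, hmem, by decide, by decide⟩
  · rintro ⟨ch, hch, hd, rfl⟩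
    fin_cases hd <;>
      exact ⟨by decide, by simpa using hch⟩

theorem pvSortedB (s : String) : (parse_steps_string_alt s).Pairwise (· < ·) := by
  unfold parse_steps_string_alt
  exact List.Pairwise.filter _ (by decide)

-- ===== VERDICT (by name: the statement is the Claim_ definition above) =====
theorem parse_steps_string_spec : Claim_equal_parse_steps_string := by
  intro s _
  unfold Spec_parse_steps_string parse_steps_string
  exact PySem.List.sorted_eq_of_perm_of_pairwise_lt _ _ _ (pvPerm s) (pvSortedB s)
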